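-- pv_equiv track=rewrite | github.com/rdchan/CS6320-NLP | hw3/hw3.py | remove_rare_features
-- ===== SOURCE A (Python) =====
-- def remove_rare_features(corpus_features, threshold=5):
--     rare_features = set()
--     common_features = set()
--     feature_counts = {}
--     for sentence in corpus_features:
--         for word_feature_list in sentence:
--             for feature in word_feature_list:
--                 if feature in feature_counts:
--                     feature_counts[feature] += 1
--                     if (feature_counts[feature] == threshold):
--                         common_features.add(feature)
--                 else:
--                     feature_counts[feature] = 1
--
--     corpus_features_rare_removed = [[[feature for feature in word_list if feature in common_features] for word_list in sentence] for sentence in corpus_features]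
--     return (corpus_features_rare_removed, common_features)
--     pass
-- ===== SOURCE B (Python) =====
-- def remove_rare_features(corpus_features, threshold=5):
--     # Brute force, no counting dict: a feature is common iff some prefix of the
--     # flattened feature stream contains it exactly `threshold` times (i.e. it has
--     # a threshold-th occurrence); for threshold == 1 this keeps every feature.
--     flat = [f for sentence in corpus_features for word_list in sentence for f in word_list]
--     common_features = {f for i, f in enumerate(flat) if flat[: i + 1].count(f) == threshold}
--     filtered = [[[f for f in word_list if f in common_features] for word_list in sentence]
--                 for sentence in corpus_features]
--     return (filtered, common_features)
-- ===== Notes on version B (the rewrite author's own statement) =====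
-- stated objective: alternative
-- what changed: Replaces A's interleaved dict-counting triple loop by flattening the corpus once and marking a feature common when some prefix of the flat stream contains it exactly threshold times (a brute-force prefix-count scan, no counting dict and no rare_features set), then applies the same filtering comprehension.
-- intended difference: For threshold = 1 on a corpus containing at least one feature, A returns an empty common set and strips every feature (its '== threshold' check sits only on the increment branch, so a first occurrence is never tested), while B keeps every feature, the intended 'appears at least once' behaviour. — e.g. on remove_rare_features([[["x"]]], 1): A returns ([[[]]], []), B returns ([[["x"]]], ["x"])
import Mathlib
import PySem

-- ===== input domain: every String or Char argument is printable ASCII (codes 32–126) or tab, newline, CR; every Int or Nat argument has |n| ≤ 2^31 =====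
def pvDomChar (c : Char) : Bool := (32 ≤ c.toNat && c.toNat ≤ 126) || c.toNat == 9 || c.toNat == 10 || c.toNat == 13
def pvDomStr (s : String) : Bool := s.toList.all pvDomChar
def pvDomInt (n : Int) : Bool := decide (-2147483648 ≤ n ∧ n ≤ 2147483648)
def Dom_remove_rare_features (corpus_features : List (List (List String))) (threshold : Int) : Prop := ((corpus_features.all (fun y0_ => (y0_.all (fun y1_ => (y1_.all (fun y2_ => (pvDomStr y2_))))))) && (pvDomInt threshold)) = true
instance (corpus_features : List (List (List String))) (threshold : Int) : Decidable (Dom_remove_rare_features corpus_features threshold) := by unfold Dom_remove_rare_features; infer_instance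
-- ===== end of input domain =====

-- B replaces A's interleaved dict-counting loop by a brute-force prefix-count scan over the
-- flattened feature stream (no counting dict); it is not faster — the objective is 'alternative'.

-- ===== PORT A =====
-- one feature step of A's triple loop: update feature_counts, add to common_features at the threshold-th occurrence
def aStep (threshold : Int) (st : PySem.Dict String Int × PySem.Set String) (feature : String) :
    PySem.Dict String Int × PySem.Set String :=
  if st.1.contains feature then
    let counts := st.1.modify feature 0 (· + 1)
    if counts.getD feature 0 = threshold then (counts, st.2.add feature) else (counts, st.2)
  else
    (st.1.insert feature 1, st.2)

def remove_rare_features (corpus_features : List (List (List String))) (threshold : Int) :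
    List (List (List String)) × List String :=
  let st := corpus_features.foldl
    (fun st sentence => sentence.foldl
      (fun st word_feature_list => word_feature_list.foldl (aStep threshold) st) st)
    (PySem.Dict.empty, PySem.Set.empty)
  let common_features := st.2
  (corpus_features.map (fun sentence => sentence.map
     (fun word_list => word_list.filter (fun feature => PySem.Set.contains common_features feature))),
   common_features)

-- ===== PORT B =====
def remove_rare_features_alt (corpus_features : List (List (List String))) (threshold : Int) :
    List (List (List String)) × List String :=
  let flat := corpus_features.flatMap (fun sentence => sentence.flatMap (fun word_list => word_list))
  let common_features : PySem.Set String := PySem.Set.ofList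
    (((PySem.List.enumerate flat).filter
        (fun q => decide (((PySem.List.slice flat none (some (q.1 + 1))).count q.2 : Int) = threshold))).map
      (·.2))
  (corpus_features.map (fun sentence => sentence.map
     (fun word_list => word_list.filter (fun f => PySem.Set.contains common_features f))),
   common_features)

-- ===== PRECONDITION & SPEC =====
-- For threshold = 1 on a corpus containing at least one feature, A returns an empty common set and
-- strips every feature (its '== threshold' check sits only on the increment branch, so the first
-- occurrence is never tested), while B keeps every feature — the intended 'appears at least once' reading.
def D_remove_rare_features (corpus_features : List (List (List String))) (threshold : Int) : Prop :=
  threshold = 1 ∧ ∃ sentence ∈ corpus_features, ∃ word_list ∈ sentence, word_list ≠ []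
instance (corpus_features : List (List (List String))) (threshold : Int) : Decidable (D_remove_rare_features corpus_features threshold) := by unfold D_remove_rare_features; infer_instance

def Spec_remove_rare_features (corpus_features : List (List (List String))) (threshold : Int) (out : List (List (List String)) × List String) : Prop := ¬ D_remove_rare_features corpus_features threshold → out = remove_rare_features_alt corpus_features threshold
instance (corpus_features : List (List (List String))) (threshold : Int) (out : List (List (List String)) × List String) : Decidable (Spec_remove_rare_features corpus_features threshold out) := by unfold Spec_remove_rare_features; infer_instance

def pvDiffWitness_remove_rare_features : List (List (List String)) × Int := ([[["x"]]], 1)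
def pvDiffWitnessOut_remove_rare_features : (List (List (List String)) × List String) × (List (List (List String)) × List String) :=
  (([[[]]], []), ([[["x"]]], ["x"]))

-- ===== CLAIM (what is proved, stated in full; the proofs are below) =====
def Claim_unchanged_remove_rare_features : Prop := ∀ (corpus_features : List (List (List String))) (threshold : Int), Dom_remove_rare_features corpus_features threshold → Spec_remove_rare_features corpus_features threshold (remove_rare_features corpus_features threshold)
def Claim_changed_remove_rare_features : Prop := Dom_remove_rare_features (pvDiffWitness_remove_rare_features.1) (pvDiffWitness_remove_rare_features.2) ∧ D_remove_rare_features (pvDiffWitness_remove_rare_features.1) (pvDiffWitness_remove_rare_features.2) ∧ remove_rare_features (pvDiffWitness_remove_rare_features.1) (pvDiffWitness_remove_rare_features.2) = pvDiffWitnessOut_remove_rare_features.1 ∧ remove_rare_features_alt (pvDiffWitness_remove_rare_features.1) (pvDiffWitness_remove_rare_features.2) = pvDiffWitnessOut_remove_rare_features.2 ∧ pvDiffWitnessOut_remove_rare_features.1 ≠ pvDiffWitnessOut_remove_rare_features.2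
def Claim_exact_remove_rare_features : Prop := ∀ (corpus_features : List (List (List String))) (threshold : Int), Dom_remove_rare_features corpus_features threshold → D_remove_rare_features corpus_features threshold → remove_rare_features corpus_features threshold ≠ remove_rare_features_alt corpus_features threshold

-- ===== LEMMAS AND PROOFS =====

-- B's common-feature list before deduplication: features listed at their threshold-th occurrence
def Lc (threshold : Int) (flat : List String) : List String :=
  ((PySem.List.enumerate flat).filter
      (fun q => decide (((PySem.List.slice flat none (some (q.1 + 1))).count q.2 : Int) = threshold))).map
    (·.2)

theorem remove_rare_features_alt_eq (corpus : List (List (List String))) (threshold : Int) :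
    remove_rare_features_alt corpus threshold =
      (let flat := corpus.flatMap (fun s => s.flatMap (fun wl => wl))
       let c := PySem.Set.ofList (Lc threshold flat)
       (corpus.map (fun s => s.map (fun wl => wl.filter (fun f => PySem.Set.contains c f))), c)) := rfl

theorem Lc_append (threshold : Int) (p : List String) (a : String) :
    Lc threshold (p ++ [a]) =
      Lc threshold p ++ (if ((p.count a : Int) + 1 = threshold) then [a] else []) := by
  unfold Lc
  rw [PySem.List.enumerate_append, List.filter_append, List.map_append]
  congr 1
  · apply congrArg
    apply List.filter_congr
    intro q hq
    rw [PySem.List.mem_enumerate_iff] at hq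
    obtain ⟨k, hk, rfl⟩ := hq
    simp only [zero_add]
    have h1 : ((k : Int) + 1) = ((k + 1 : Nat) : Int) := by push_cast; ring
    rw [h1, PySem.List.slice_to_natCast, PySem.List.slice_to_natCast,
      List.take_append_of_le_length (by omega)]
  · rw [PySem.List.enumerate_cons, PySem.List.enumerate_nil]
    have h1 : ((0 : Int) + p.length + 1) = ((p.length + 1 : Nat) : Int) := by push_cast; ring
    simp only [List.filter_cons, List.filter_nil, h1, PySem.List.slice_to_natCast]
    rw [List.take_of_length_le (by simp)]
    simp only [List.count_append, List.count_singleton]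
    by_cases h : ((p.count a : Int) + 1 = threshold)
    · rw [if_pos, if_pos h]
      · rfl
      · rw [decide_eq_true_iff]; push_cast; simp only [BEq.rfl, if_true]; omega
    · rw [if_neg, if_neg h]
      · rfl
      · rw [decide_eq_true_iff]; push_cast; simp only [BEq.rfl, if_true]; omega

theorem mem_Lc {threshold : Int} {p : List String} {f : String} (h : f ∈ Lc threshold p) :
    threshold ≤ (p.count f : Int) := by
  unfold Lc at h
  simp only [List.mem_map, List.mem_filter] at h
  obtain ⟨q, ⟨hq, hcond⟩, rfl⟩ := h
  rw [PySem.List.mem_enumerate_iff] at hq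
  obtain ⟨k, hk, rfl⟩ := hq
  simp only [zero_add, decide_eq_true_iff] at hcond
  have h1 : ((k : Int) + 1) = ((k + 1 : Nat) : Int) := by push_cast; ring
  rw [h1, PySem.List.slice_to_natCast] at hcond
  have h2 : ((0 : Int) + (k : Int), p[k]).2 = p[k] := rfl
  rw [h2]
  have hle : (p.take (k + 1)).count p[k] ≤ p.count p[k] :=
    (List.take_sublist (k + 1) p).count_le _
  omega

theorem nodup_Lc (threshold : Int) (p : List String) : (Lc threshold p).Nodup := by
  induction p using List.reverseRecOn with
  | nil => exact List.nodup_nil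
  | append_singleton p a ih =>
      rw [Lc_append]
      by_cases h : ((p.count a : Int) + 1 = threshold)
      · rw [if_pos h]
        rw [List.nodup_append]
        refine ⟨ih, List.nodup_singleton a, ?_⟩
        intro x hx y hy hxy
        rw [List.mem_singleton] at hy
        subst hy
        subst hxy
        have := mem_Lc hx
        omega
      · rw [if_neg h]
        simpa using ih

-- A's nested triple fold is the fold over the flattened feature stream
theorem nested_foldl_eq (g : PySem.Dict String Int × PySem.Set String → String → PySem.Dict String Int × PySem.Set String)
    (corpus : List (List (List String))) (init : PySem.Dict String Int × PySem.Set String) :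
    corpus.foldl (fun st sentence => sentence.foldl (fun st wl => wl.foldl g st) st) init =
      (corpus.flatMap (fun s => s.flatMap (fun wl => wl))).foldl g init := by
  induction corpus generalizing init with
  | nil => rfl
  | cons s rest ih =>
      simp only [List.foldl_cons, List.flatMap_cons, List.foldl_append, ih]
      congr 1
      induction s generalizing init with
      | nil => rfl
      | cons wl rest2 ih2 =>
          simp only [List.foldl_cons, List.flatMap_cons, List.foldl_append, ih2]

-- the loop invariant of A's counting loop, for threshold ≠ 1
theorem aloop (threshold : Int) (hthr : threshold ≠ 1) :
    ∀ (s p : List String) (d : PySem.Dict String Int) (c : PySem.Set String),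
      (∀ f, d.getD f 0 = (p.count f : Int)) →
      (∀ f, d.contains f = true ↔ f ∈ p) →
      c = Lc threshold p →
      (s.foldl (aStep threshold) (d, c)).2 = Lc threshold (p ++ s) := by
  intro s
  induction s with
  | nil =>
      intro p d c hd hcont hc
      simpa using hc
  | cons f rest ih =>
      intro p d c hd hcont hc
      rw [List.foldl_cons]
      have hpf : p ++ f :: rest = (p ++ [f]) ++ rest := by simp
      rw [hpf]
      by_cases hmem : f ∈ p
      · -- increment branch
        have hcf : d.contains f = true := (hcont f).mpr hmem
        have hstep : aStep threshold (d, c) f =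
            (if (d.getD f 0 + 1 = threshold)
              then (d.modify f 0 (· + 1), c.add f)
              else (d.modify f 0 (· + 1), c)) := by
          unfold aStep
          simp only [hcf, if_true, PySem.Dict.getD_modify_self]
        have hd' : ∀ f', (d.modify f 0 (· + 1)).getD f' 0 = (((p ++ [f]).count f' : Nat) : Int) := by
          intro f'
          rw [PySem.Dict.getD_modify]
          by_cases hf : f' = f
          · subst hf; simp [hd f', List.count_append]
          · have hne1 : (f == f') = false := by
              simpa [beq_iff_eq] using fun h => hf h.symm
            have hne2 : (f' == f) = false := by
              simpa [beq_iff_eq] using hf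
            simp [hf, hd f', List.count_append, List.count_singleton, hne1]
        have hcont' : ∀ f', (d.modify f 0 (· + 1)).contains f' = true ↔ f' ∈ p ++ [f] := by
          intro f'
          rw [PySem.Dict.contains_modify]
          simp [hcont f', or_comm]
        by_cases hth : (((p.count f : Nat) : Int) + 1 = threshold)
        · have hnotin : f ∉ c := by
            intro hin
            rw [hc] at hin
            have := mem_Lc hin
            omega
          have hcadd : c.add f = c ++ [f] := by simp [PySem.Set.add, hnotin]
          rw [hstep, if_pos (by rw [hd f]; exact hth)]
          rw [ih (p ++ [f]) _ _ hd' hcont' (by rw [hcadd, hc, Lc_append, if_pos hth])]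
        · rw [hstep, if_neg (by rw [hd f]; exact hth)]
          rw [ih (p ++ [f]) _ _ hd' hcont' (by rw [hc, Lc_append, if_neg hth]; simp)]
      · -- fresh-feature branch
        have hcf : d.contains f = false := by
          rcases Bool.eq_false_or_eq_true (d.contains f) with h | h
          · exact absurd ((hcont f).mp h) hmem
          · exact h
        have hstep : aStep threshold (d, c) f = (d.insert f 1, c) := by
          simp [aStep, hcf]
        have hcnt0 : p.count f = 0 := List.count_eq_zero_of_not_mem hmem
        have hd' : ∀ f', (d.insert f 1).getD f' 0 = (((p ++ [f]).count f' : Nat) : Int) := by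
          intro f'
          rw [PySem.Dict.getD_insert]
          by_cases hf : f' = f
          · subst hf; simp [List.count_append, hcnt0]
          · have hne1 : (f == f') = false := by
              simpa [beq_iff_eq] using fun h => hf h.symm
            have hne2 : (f' == f) = false := by
              simpa [beq_iff_eq] using hf
            simp [hf, hd f', List.count_append, List.count_singleton, hne1]
        have hcont' : ∀ f', (d.insert f 1).contains f' = true ↔ f' ∈ p ++ [f] := by
          intro f'
          rw [PySem.Dict.contains_insert]
          simp [hcont f', or_comm]
        have hc' : c = Lc threshold (p ++ [f]) := by
          rw [hc, Lc_append, hcnt0]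
          have : ¬ (((0 : Nat) : Int) + 1 = threshold) := by
            intro h; exact hthr (by omega)
          rw [if_neg this]; simp
        rw [hstep, ih (p ++ [f]) _ _ hd' hcont' hc']

-- the loop invariant for threshold = 1: A never adds anything
theorem aloop_one :
    ∀ (s p : List String) (d : PySem.Dict String Int) (c : PySem.Set String),
      (∀ f, d.getD f 0 = (p.count f : Int)) →
      (∀ f, d.contains f = true ↔ f ∈ p) →
      (s.foldl (aStep 1) (d, c)).2 = c := by
  intro s
  induction s with
  | nil => intro p d c hd hcont; rfl
  | cons f rest ih =>
      intro p d c hd hcont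
      rw [List.foldl_cons]
      by_cases hmem : f ∈ p
      · have hcf : d.contains f = true := (hcont f).mpr hmem
        have hpos : 1 ≤ p.count f := List.count_pos_iff.mpr hmem
        have hstep : aStep 1 (d, c) f = (d.modify f 0 (· + 1), c) := by
          unfold aStep
          simp only [hcf, if_true, PySem.Dict.getD_modify_self, hd f]
          rw [if_neg (by omega)]
        have hd' : ∀ f', (d.modify f 0 (· + 1)).getD f' 0 = (((p ++ [f]).count f' : Nat) : Int) := by
          intro f'
          rw [PySem.Dict.getD_modify]
          by_cases hf : f' = f
          · subst hf; simp [hd f', List.count_append]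
          · have hne1 : (f == f') = false := by
              simpa [beq_iff_eq] using fun h => hf h.symm
            have hne2 : (f' == f) = false := by
              simpa [beq_iff_eq] using hf
            simp [hf, hd f', List.count_append, List.count_singleton, hne1]
        have hcont' : ∀ f', (d.modify f 0 (· + 1)).contains f' = true ↔ f' ∈ p ++ [f] := by
          intro f'
          rw [PySem.Dict.contains_modify]
          simp [hcont f', or_comm]
        rw [hstep, ih (p ++ [f]) _ _ hd' hcont']
      · have hcf : d.contains f = false := by
          rcases Bool.eq_false_or_eq_true (d.contains f) with h | h
          · exact absurd ((hcont f).mp h) hmem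
          · exact h
        have hcnt0 : p.count f = 0 := List.count_eq_zero_of_not_mem hmem
        have hstep : aStep 1 (d, c) f = (d.insert f 1, c) := by
          simp [aStep, hcf]
        have hd' : ∀ f', (d.insert f 1).getD f' 0 = (((p ++ [f]).count f' : Nat) : Int) := by
          intro f'
          rw [PySem.Dict.getD_insert]
          by_cases hf : f' = f
          · subst hf; simp [List.count_append, hcnt0]
          · have hne1 : (f == f') = false := by
              simpa [beq_iff_eq] using fun h => hf h.symm
            have hne2 : (f' == f) = false := by
              simpa [beq_iff_eq] using hf
            simp [hf, hd f', List.count_append, List.count_singleton, hne1]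
        have hcont' : ∀ f', (d.insert f 1).contains f' = true ↔ f' ∈ p ++ [f] := by
          intro f'
          rw [PySem.Dict.contains_insert]
          simp [hcont f', or_comm]
        rw [hstep, ih (p ++ [f]) _ _ hd' hcont']

-- ===== VERDICT (by name: the statement is the Claim_ definition above) =====
theorem Lc_one_mem {flat : List String} (h : flat ≠ []) :
    Lc 1 flat ≠ [] := by
  cases flat with
  | nil => exact absurd rfl h
  | cons f0 rest =>
      have hmem : f0 ∈ Lc 1 (f0 :: rest) := by
        unfold Lc
        refine List.mem_map.mpr ⟨((0 : Int), f0), List.mem_filter.mpr ⟨?_, ?_⟩, rfl⟩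
        · rw [PySem.List.enumerate_cons]; exact List.mem_cons_self
        · rw [decide_eq_true_iff]
          have h01 : ((0 : Int), f0).1 + 1 = ((1 : Nat) : Int) := by norm_num
          rw [h01, PySem.List.slice_to_natCast]
          simp
      exact List.ne_nil_of_mem hmem

theorem remove_rare_features_spec : Claim_unchanged_remove_rare_features := by
  intro corpus threshold hdom
  unfold Spec_remove_rare_features
  intro hnd
  have hkey : ((corpus.flatMap (fun s => s.flatMap (fun wl => wl))).foldl
        (aStep threshold) (PySem.Dict.empty, PySem.Set.empty)).2
      = PySem.Set.ofList (Lc threshold (corpus.flatMap (fun s => s.flatMap (fun wl => wl)))) := by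
    rw [PySem.Set.ofList_eq_self_of_nodup _ (nodup_Lc threshold _)]
    by_cases hth : threshold = 1
    · subst hth
      have hne : ¬ ∃ s ∈ corpus, ∃ wl ∈ s, wl ≠ [] := fun h => hnd ⟨rfl, h⟩
      have hfe : corpus.flatMap (fun s => s.flatMap (fun wl => wl)) = [] := by
        rw [List.flatMap_eq_nil_iff]
        intro s hs
        rw [List.flatMap_eq_nil_iff]
        intro wl hwl
        by_contra hnez
        exact hne ⟨s, hs, wl, hwl, hnez⟩
      rw [hfe]
      rfl
    · have := aloop threshold hth (corpus.flatMap (fun s => s.flatMap (fun wl => wl))) []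
        PySem.Dict.empty PySem.Set.empty (fun f => by simp) (fun f => by simp) rfl
      simpa using this
  simp only [remove_rare_features, remove_rare_features_alt]
  rw [nested_foldl_eq (aStep threshold) corpus, hkey]
  rfl

theorem remove_rare_features_changed : Claim_changed_remove_rare_features := by
  unfold Claim_changed_remove_rare_features; decide

theorem remove_rare_features_tight : Claim_exact_remove_rare_features := by
  unfold Claim_exact_remove_rare_features
  intro corpus threshold hdom hD heq
  obtain ⟨h1, s0, hs0, wl0, hwl0, hne0⟩ := hD
  subst h1
  have hA : (remove_rare_features corpus 1).2 = [] := by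
    simp only [remove_rare_features]
    rw [nested_foldl_eq (aStep 1) corpus]
    exact aloop_one _ [] _ _ (fun f => by simp) (fun f => by simp)
  have hflatne : corpus.flatMap (fun s => s.flatMap (fun wl => wl)) ≠ [] := by
    intro h
    rw [List.flatMap_eq_nil_iff] at h
    have h' := h s0 hs0
    rw [List.flatMap_eq_nil_iff] at h'
    exact hne0 (h' wl0 hwl0)
  have hB : (remove_rare_features_alt corpus 1).2 ≠ [] := by
    have h2 : (remove_rare_features_alt corpus 1).2
        = Lc 1 (corpus.flatMap (fun s => s.flatMap (fun wl => wl))) := by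
      rw [remove_rare_features_alt_eq]
      exact PySem.Set.ofList_eq_self_of_nodup _ (nodup_Lc _ _)
    rw [h2]
    exact Lc_one_mem hflatne
  exact hB (by rw [← heq, hA])
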